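-- pv_equiv track=rewrite | github.com/an0mium/aragora | aragora/server/handlers/pipeline/transitions.py | _cluster_ideas
-- ===== SOURCE A (Python) =====
-- from typing import Any
--
-- def _cluster_ideas(ideas: list[dict[str, Any]]) -> list[list[dict[str, Any]]]:
--     """Group ideas by simple keyword overlap clustering."""
--     if not ideas:
--         return []
--     if len(ideas) <= 2:
--         return [ideas]
--
--     clusters: list[list[dict[str, Any]]] = []
--     assigned: set[int] = set()
--
--     for i, idea in enumerate(ideas):
--         if i in assigned:
--             continue
--         cluster = [idea]
--         assigned.add(i)
--         words_i = set((idea.get("label") or idea.get("text", "")).lower().split())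
--         for j in range(i + 1, len(ideas)):
--             if j in assigned:
--                 continue
--             words_j = set((ideas[j].get("label") or ideas[j].get("text", "")).lower().split())
--             if words_i & words_j:
--                 cluster.append(ideas[j])
--                 assigned.add(j)
--         clusters.append(cluster)
--     return clusters
-- ===== SOURCE B (Python) =====
-- from typing import Any
--
-- def _cluster_ideas(ideas: list[dict[str, Any]]) -> list[list[dict[str, Any]]]:
--     """Group ideas by keyword overlap: precompute each idea's word set once,
--     then repeatedly partition the remaining ideas against the first one."""
--     if not ideas:
--         return []
--     if len(ideas) <= 2:
--         return [ideas]
--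
--     def words(idea: dict[str, Any]) -> set[str]:
--         return set((idea.get("label") or idea.get("text", "")).lower().split())
--
--     remaining = [(idea, words(idea)) for idea in ideas]
--     clusters: list[list[dict[str, Any]]] = []
--     while remaining:
--         (seed, w), rest = remaining[0], remaining[1:]
--         clusters.append([seed] + [d for d, wd in rest if w & wd])
--         remaining = [(d, wd) for d, wd in rest if not (w & wd)]
--     return clusters
-- ===== Notes on version B (the rewrite author's own statement) =====
-- stated objective: alternative
-- what changed: B precomputes every idea's word set once and builds clusters by repeatedly partitioning the remaining list against its first element, instead of A's index loops over a mutating assigned-set that re-split and re-lower each idea's text once per seed.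
import Mathlib
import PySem

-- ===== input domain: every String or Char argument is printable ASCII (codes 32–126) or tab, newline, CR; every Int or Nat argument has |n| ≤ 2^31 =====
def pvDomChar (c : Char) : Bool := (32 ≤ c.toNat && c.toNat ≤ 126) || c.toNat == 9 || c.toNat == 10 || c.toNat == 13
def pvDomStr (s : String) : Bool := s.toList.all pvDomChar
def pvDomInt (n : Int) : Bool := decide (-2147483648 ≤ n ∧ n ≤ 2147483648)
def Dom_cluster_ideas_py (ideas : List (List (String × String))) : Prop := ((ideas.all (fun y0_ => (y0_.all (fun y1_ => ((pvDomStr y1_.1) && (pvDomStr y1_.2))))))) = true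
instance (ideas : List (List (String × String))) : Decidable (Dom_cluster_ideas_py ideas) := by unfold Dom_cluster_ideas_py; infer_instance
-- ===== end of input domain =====

-- B replaces A's index loops over a mutating `assigned` set (which re-parse each idea's
-- word set once per seed) by precomputing every word set once and repeatedly
-- PARTITIONING the remaining list against its first element (objective: alternative).

-- ===== PORT A =====
-- (idea.get("label") or idea.get("text", "")) : a missing or empty "label" falls back to "text"
def pvKey (idea : List (String × String)) : String :=
  let l := (PySem.Dict.mk idea).getD "label" ""
  if l = "" then (PySem.Dict.mk idea).getD "text" "" else l

-- set(key.lower().split())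
def pvWords (idea : List (String × String)) : PySem.Set String :=
  PySem.Set.ofList (PySem.Str.split₀ (PySem.Str.lower (pvKey idea)))

-- truthiness of `words_i & words_j`
def pvOverlap (w1 w2 : PySem.Set String) : Bool :=
  !(PySem.Set.inter w1 w2).isEmpty

-- outer `for i, idea in enumerate(ideas)` loop; the inner `for j in range(i+1, n)`
-- loop scans exactly the entries after the current one, kept here as `rest`.
def pvOuterA (e : List (Int × List (String × String)))
    (clusters : List (List (List (String × String)))) (assigned : PySem.Set Int) :
    List (List (List (String × String))) :=
  match e with
  | [] => clusters
  | (i, idea) :: rest =>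
    if assigned.contains i then pvOuterA rest clusters assigned
    else
      let wi := pvWords idea
      let st := rest.foldl
        (fun (st : List (List (String × String)) × PySem.Set Int) (p : Int × List (String × String)) =>
          if st.2.contains p.1 then st
          else if pvOverlap wi (pvWords p.2) then (st.1 ++ [p.2], st.2.add p.1) else st)
        ([idea], assigned.add i)
      pvOuterA rest (clusters ++ [st.1]) st.2

def cluster_ideas_py (ideas : List (List (String × String))) : List (List (List (String × String))) :=
  if ideas.isEmpty then []
  else if ideas.length ≤ 2 then [ideas]
  else pvOuterA (PySem.List.enumerate ideas 0) [] PySem.Set.empty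

-- ===== PORT B =====
-- while remaining: seed = head; cluster = seed + overlapping rest; recurse on the others
def pvClusterRec (rem : List (List (String × String) × PySem.Set String)) :
    List (List (List (String × String))) :=
  match rem with
  | [] => []
  | (d, w) :: rest =>
    (d :: (rest.filter (fun p => pvOverlap w p.2)).map (·.1)) ::
      pvClusterRec (rest.filter (fun p => !pvOverlap w p.2))
termination_by rem.length
decreasing_by
  simp only [List.length_cons, List.length_unattach]
  exact Nat.lt_succ_of_le (le_trans (List.length_filter_le _ _) (by simp))

def cluster_ideas_py_alt (ideas : List (List (String × String))) : List (List (List (String × String))) :=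
  if ideas.isEmpty then []
  else if ideas.length ≤ 2 then [ideas]
  else pvClusterRec (ideas.map (fun d => (d, pvWords d)))

-- ===== PRECONDITION & SPEC =====
def Spec_cluster_ideas_py (ideas : List (List (String × String))) (out : List (List (List (String × String)))) : Prop := out = cluster_ideas_py_alt ideas
instance (ideas : List (List (String × String))) (out : List (List (List (String × String)))) : Decidable (Spec_cluster_ideas_py ideas out) := by unfold Spec_cluster_ideas_py; infer_instance

-- ===== CLAIM (what is proved, stated in full; the proofs are below) =====
def Claim_equal_cluster_ideas_py : Prop := ∀ (ideas : List (List (String × String))), Dom_cluster_ideas_py ideas → Spec_cluster_ideas_py ideas (cluster_ideas_py ideas)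

-- ===== LEMMAS AND PROOFS =====

theorem pv_contains_add (S : PySem.Set Int) (j x : Int) (hx : x ≠ j) :
    (S.add j).contains x = S.contains x := by
  rw [Bool.eq_iff_iff, PySem.Set.contains_iff, PySem.Set.contains_iff, PySem.Set.mem_add]
  constructor
  · rintro (h | h)
    · exact h
    · exact absurd h hx
  · exact Or.inl

theorem pv_fst_filter_mem (rest : List (Int × List (String × String)))
    (h : (rest.map (·.1)).Nodup) (q : Int × List (String × String) → Bool)
    (p : Int × List (String × String)) (hp : p ∈ rest) :
    p.1 ∈ (rest.filter q).map (·.1) ↔ q p = true := by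
  constructor
  · intro hm
    rcases List.mem_map.mp hm with ⟨a, ha, hfa⟩
    rcases List.mem_filter.mp ha with ⟨ha1, ha2⟩
    have : a = p := List.inj_on_of_nodup_map h ha1 hp hfa
    exact this ▸ ha2
  · intro hq
    exact List.mem_map.mpr ⟨p, List.mem_filter.mpr ⟨hp, hq⟩, rfl⟩

theorem pv_inner_eq (wi : PySem.Set String) (rest : List (Int × List (String × String))) :
    ∀ (cl : List (List (String × String))) (S : PySem.Set Int),
    (rest.map (·.1)).Nodup →
    rest.foldl
      (fun (st : List (List (String × String)) × PySem.Set Int) (p : Int × List (String × String)) =>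
        if st.2.contains p.1 then st
        else if pvOverlap wi (pvWords p.2) then (st.1 ++ [p.2], st.2.add p.1) else st)
      (cl, S) =
    (cl ++ (rest.filter (fun p => !S.contains p.1 && pvOverlap wi (pvWords p.2))).map (·.2),
     S.update ((rest.filter (fun p => !S.contains p.1 && pvOverlap wi (pvWords p.2))).map (·.1))) := by
  induction rest with
  | nil => intro cl S _; simp [PySem.Set.update]
  | cons hd tl ih =>
    intro cl S hnd
    obtain ⟨j, d⟩ := hd
    have hpair := List.nodup_cons.mp (by simpa only [List.map_cons] using hnd)
    have hjn : j ∉ tl.map (·.1) := hpair.1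
    have hndtl : (tl.map (·.1)).Nodup := hpair.2
    have hfc : tl.filter (fun p => !(S.add j).contains p.1 && pvOverlap wi (pvWords p.2))
        = tl.filter (fun p => !S.contains p.1 && pvOverlap wi (pvWords p.2)) := by
      refine List.filter_congr (fun p hp => ?_)
      have hne : p.1 ≠ j := fun he => hjn (he ▸ List.mem_map_of_mem hp)
      rw [pv_contains_add S j p.1 hne]
    by_cases hc : S.contains j
    · rw [List.foldl_cons]
      simp only [hc, if_true]
      rw [ih cl S hndtl]
      have hj : j ∈ S := (PySem.Set.contains_iff _ _).mp hc
      simp [hj]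
    · have hj : j ∉ S := fun h => by
        rw [(PySem.Set.contains_iff _ _).mpr h] at hc; exact absurd hc (by simp)
      by_cases ho : pvOverlap wi (pvWords d)
      · rw [List.foldl_cons]
        simp only [hc, ho, Bool.false_eq_true, if_false, if_true]
        rw [ih (cl ++ [d]) (S.add j) hndtl, hfc]
        simp [hj, ho, PySem.Set.update]
      · rw [List.foldl_cons]
        simp only [hc, ho, Bool.false_eq_true, if_false]
        rw [ih cl S hndtl]
        simp [hj, ho]

theorem pv_outer_eq (e : List (Int × List (String × String))) :
    ∀ (cs : List (List (List (String × String)))) (S : PySem.Set Int),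
    (e.map (·.1)).Nodup →
    pvOuterA e cs S =
      cs ++ pvClusterRec ((e.filter (fun p => !S.contains p.1)).map (fun p => (p.2, pvWords p.2))) := by
  induction e with
  | nil => intro cs S _; simp [pvOuterA, pvClusterRec]
  | cons hd tl ih =>
    intro cs S hnd
    obtain ⟨i, d⟩ := hd
    have hpair := List.nodup_cons.mp (by simpa only [List.map_cons] using hnd)
    have hin : i ∉ tl.map (·.1) := hpair.1
    have hndtl : (tl.map (·.1)).Nodup := hpair.2
    by_cases hc : S.contains i
    · have hi : i ∈ S := (PySem.Set.contains_iff _ _).mp hc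
      rw [pvOuterA]
      simp only [hc, if_true]
      rw [ih cs S hndtl]
      simp [hi]
    · have hi : i ∉ S := fun h => by
        rw [(PySem.Set.contains_iff _ _).mpr h] at hc; exact absurd hc (by simp)
      rw [pvOuterA]
      simp only [hc, Bool.false_eq_true, if_false]
      rw [pv_inner_eq (pvWords d) tl [d] (S.add i) hndtl]
      have hfc : tl.filter (fun p => !(S.add i).contains p.1 && pvOverlap (pvWords d) (pvWords p.2))
          = tl.filter (fun p => !S.contains p.1 && pvOverlap (pvWords d) (pvWords p.2)) := by
        refine List.filter_congr (fun p hp => ?_)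
        have hne : p.1 ≠ i := fun he => hin (he ▸ List.mem_map_of_mem hp)
        rw [pv_contains_add S i p.1 hne]
      rw [hfc]
      rw [ih (cs ++ [[d] ++ _]) _ hndtl]
      have hS'f : tl.filter (fun p => !(((S.add i).update
            ((tl.filter (fun p => !S.contains p.1 && pvOverlap (pvWords d) (pvWords p.2))).map (·.1))).contains p.1))
          = tl.filter (fun p => !S.contains p.1 && !pvOverlap (pvWords d) (pvWords p.2)) := by
        refine List.filter_congr (fun p hp => ?_)
        have hne : p.1 ≠ i := fun he => hin (he ▸ List.mem_map_of_mem hp)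
        have hm := pv_fst_filter_mem tl hndtl
          (fun p => !S.contains p.1 && pvOverlap (pvWords d) (pvWords p.2)) p hp
        have hcon : (((S.add i).update
            ((tl.filter (fun p => !S.contains p.1 && pvOverlap (pvWords d) (pvWords p.2))).map (·.1))).contains p.1) = true ↔
            (p.1 ∈ S ∨ p.1 = i) ∨
              (!S.contains p.1 && pvOverlap (pvWords d) (pvWords p.2)) = true := by
          rw [PySem.Set.contains_iff, PySem.Set.mem_update, PySem.Set.mem_add, hm]
        cases hS : S.contains p.1 <;> cases hov : pvOverlap (pvWords d) (pvWords p.2)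
        · have hf : (((S.add i).update
              ((tl.filter (fun p => !S.contains p.1 && pvOverlap (pvWords d) (pvWords p.2))).map (·.1))).contains p.1) = false := by
            rw [Bool.eq_false_iff]
            intro h
            rcases hcon.mp h with (h | h) | h
            · rw [(PySem.Set.contains_iff _ _).mpr h] at hS; exact absurd hS (by simp)
            · exact hne h
            · rw [hS, hov] at h; exact absurd h (by simp)
          rw [hf]
          decide
        · have ht := hcon.mpr (Or.inr (by rw [hS, hov]; rfl))
          rw [ht]
          decide
        · have ht := hcon.mpr (Or.inl (Or.inl ((PySem.Set.contains_iff _ _).mp hS)))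
          rw [ht]
          decide
        · have ht := hcon.mpr (Or.inl (Or.inl ((PySem.Set.contains_iff _ _).mp hS)))
          rw [ht]
          decide
      rw [hS'f]
      have hhd : ((i, d) :: tl).filter (fun p => !S.contains p.1)
          = (i, d) :: tl.filter (fun p => !S.contains p.1) := by
        simp [hi]
      rw [hhd, List.map_cons]
      simp only [pvClusterRec, List.filter_map, List.map_map, List.filter_filter, Function.comp]
      have hcomm1 : tl.filter (fun a => pvOverlap (pvWords d) (pvWords a.2) && !S.contains a.1)
          = tl.filter (fun p => !S.contains p.1 && pvOverlap (pvWords d) (pvWords p.2)) :=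
        List.filter_congr (fun p _ => Bool.and_comm _ _)
      have hcomm2 : tl.filter (fun a => !pvOverlap (pvWords d) (pvWords a.2) && !S.contains a.1)
          = tl.filter (fun p => !S.contains p.1 && !pvOverlap (pvWords d) (pvWords p.2)) :=
        List.filter_congr (fun p _ => Bool.and_comm _ _)
      rw [hcomm1, hcomm2]
      simp [Function.comp, List.append_assoc]

-- ===== VERDICT (by name: the statement is the Claim_ definition above) =====
theorem cluster_ideas_py_spec : Claim_equal_cluster_ideas_py := by
  intro ideas _
  unfold Spec_cluster_ideas_py cluster_ideas_py cluster_ideas_py_alt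
  by_cases h0 : ideas.isEmpty
  · simp [h0]
  · simp only [h0]
    by_cases h2 : ideas.length ≤ 2
    · simp [h2]
    · simp only [h2, if_false]
      have hnd : ((PySem.List.enumerate ideas 0).map (·.1)).Nodup := by
        have h := PySem.List.pairwise_lt_enumerate ideas 0
        exact List.pairwise_map.mpr (h.imp fun hlt => Int.ne_of_lt hlt)
      rw [pv_outer_eq _ [] PySem.Set.empty hnd]
      have hfilt : (PySem.List.enumerate ideas 0).filter (fun p => !PySem.Set.empty.contains p.1)
          = PySem.List.enumerate ideas 0 :=
        List.filter_eq_self.mpr (fun a _ => by simp [PySem.Set.empty, PySem.Set.contains])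
      rw [hfilt]
      have hmap : (PySem.List.enumerate ideas 0).map (fun p => (p.2, pvWords p.2))
          = ideas.map (fun d => (d, pvWords d)) := by
        conv_rhs => rw [← PySem.List.map_snd_enumerate ideas 0]
        rw [List.map_map]
        rfl
      rw [hmap, List.nil_append]
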